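-- pv_equiv track=rewrite | github.com/harrimand/pySnips | qm.py | compBin
-- ===== SOURCE A (Python) =====
-- def compBin(astr, bstr):
--     """Compare strings with matching lengths containing
--     0s, 1s and Xs.
--     If Xs are aligned in both strings and only one
--     other character is different, return a string
--     containing an X where a 1 in one string
--     aligns with a 0 in the other string.
--     If an appropriate comparison is not found,
--     return an empty string."""
--     result = ""
--     chgCount = 0
--     for c in range(len(astr)):
--         if astr[c] == bstr[c]:
--             result += astr[c]
--         elif astr[c] != 'X' and bstr[c] != 'X':
--             result += 'X'
--             chgCount += 1
--         else:
--             result = ""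
--             break
--     if chgCount > 1:
--         result = ""
--     return result
-- ===== SOURCE B (Python) =====
-- def compBin(astr, bstr):
--     diffs = [i for i in range(len(astr)) if astr[i] != bstr[i]]
--     if any(astr[i] == 'X' or bstr[i] == 'X' for i in diffs):
--         return ""
--     if len(diffs) > 1:
--         return ""
--     if not diffs:
--         return astr
--     chars = list(astr)
--     chars[diffs[0]] = 'X'
--     return "".join(chars)
-- ===== Notes on version B (the rewrite author's own statement) =====
-- stated objective: simpler
-- what changed: Replaces A's single stateful accumulate-and-break loop with a declarative decomposition: first collect the differing positions, then decide ('' on an X-misalignment or more than one difference), and build the result by setting the single differing index to 'X' (or returning astr unchanged).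
-- outside the precondition, e.g. on compBin('X0', '1'): A returns '', B raises IndexError
import Mathlib
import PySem

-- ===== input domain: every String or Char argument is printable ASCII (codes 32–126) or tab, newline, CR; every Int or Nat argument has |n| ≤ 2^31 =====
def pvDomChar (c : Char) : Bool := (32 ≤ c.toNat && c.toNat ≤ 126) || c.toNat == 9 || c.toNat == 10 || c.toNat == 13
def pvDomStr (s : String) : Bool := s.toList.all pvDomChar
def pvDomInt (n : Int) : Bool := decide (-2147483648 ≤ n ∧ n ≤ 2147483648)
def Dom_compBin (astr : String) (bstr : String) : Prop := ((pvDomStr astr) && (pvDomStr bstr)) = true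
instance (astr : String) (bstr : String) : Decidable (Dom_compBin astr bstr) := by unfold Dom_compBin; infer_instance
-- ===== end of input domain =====

-- B replaces A's stateful accumulate-and-break loop by a declarative decomposition
-- (collect the differing positions, decide, patch one index); same cost, simpler to read.

-- ===== PORT A =====
-- A's for-loop: state (result, chgCount); the early 'break' returns ([], chg).
def compBinGo : List Char → List Char → List Char → Nat → List Char × Nat
  | [], _, res, chg => (res, chg)
  | _ :: _, [], res, chg => (res, chg)   -- bstr[c] would raise IndexError here; outside Pre_
  | a :: as, b :: bs, res, chg =>
    if a = b then compBinGo as bs (res ++ [a]) chg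
    else if a ≠ 'X' ∧ b ≠ 'X' then compBinGo as bs (res ++ ['X']) (chg + 1)
    else ([], chg)

def compBin (astr : String) (bstr : String) : String :=
  if (compBinGo astr.toList bstr.toList [] 0).2 > 1 then ""
  else String.ofList (compBinGo astr.toList bstr.toList [] 0).1

-- ===== PORT B =====
-- Source B's 'diffs' list: the indices i in range(len(astr)) with astr[i] != bstr[i]
def altDiffs (a b : List Char) : List Nat :=
  (List.range a.length).filter (fun i => !(a.getD i ' ' == b.getD i ' '))

def compBin_alt (astr : String) (bstr : String) : String :=
  let a := astr.toList
  let b := bstr.toList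
  if (altDiffs a b).any (fun i => a.getD i ' ' == 'X' || b.getD i ' ' == 'X') then ""
  else if (altDiffs a b).length > 1 then ""
  else
    match altDiffs a b with
    | [] => astr
    | i :: _ => String.ofList (a.set i 'X')

-- ===== PRECONDITION & SPEC =====
-- Pre_ excludes bstr shorter than astr: there A raises IndexError, except when an
-- X-misalignment occurs before bstr's end, where A's early break accidentally returns ''
-- while B (which collects all differing positions first) raises the IndexError.
def Pre_compBin (astr : String) (bstr : String) : Prop :=
  astr.toList.length ≤ bstr.toList.length
instance (astr : String) (bstr : String) : Decidable (Pre_compBin astr bstr) := by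
  unfold Pre_compBin; infer_instance

def pvWitness_compBin : String × String := ("10X", "11X")

def Spec_compBin (astr : String) (bstr : String) (out : String) : Prop := out = compBin_alt astr bstr
instance (astr : String) (bstr : String) (out : String) : Decidable (Spec_compBin astr bstr out) := by unfold Spec_compBin; infer_instance

-- ===== CLAIM (what is proved, stated in full; the proofs are below) =====
def Claim_equal_compBin : Prop := ∀ (astr : String) (bstr : String), Dom_compBin astr bstr → Pre_compBin astr bstr → Spec_compBin astr bstr (compBin astr bstr)

-- ===== LEMMAS AND PROOFS =====

-- is there a differing pair with an 'X' on either side?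
def hasMisX (a b : List Char) : Bool :=
  (a.zip b).any (fun p => !(p.1 == p.2) && (p.1 == 'X' || p.2 == 'X'))

def pairF (p : Char × Char) : Char := if p.1 = p.2 then p.1 else 'X'
def pairD (p : Char × Char) : Bool := !(p.1 == p.2)

lemma range_map_getD_eq_zip (a b : List Char) (h : a.length ≤ b.length) :
    (List.range a.length).map (fun i => (a.getD i ' ', b.getD i ' ')) = a.zip b := by
  apply List.ext_getElem
  · simp [List.length_zip]; omega
  · intro i h1 h2
    have hia : i < a.length := by simpa using h1
    have hib : i < b.length := lt_of_lt_of_le hia h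
    simp [List.getD_eq_getElem?_getD, hia, hib]

lemma go_misX (a : List Char) : ∀ (b : List Char) (res : List Char) (chg : Nat),
    a.length ≤ b.length → hasMisX a b = true → (compBinGo a b res chg).1 = [] := by
  induction a with
  | nil => intro b res chg _ hm; simp [hasMisX] at hm
  | cons x xs ih =>
    intro b res chg hl hm
    cases b with
    | nil => simp at hl
    | cons y ys =>
      simp only [hasMisX, List.zip_cons_cons, List.any_cons, Bool.or_eq_true] at hm
      by_cases hxy : x = y
      · subst hxy
        simp only [compBinGo, if_true]
        apply ih ys _ chg (by simpa using hl)
        rcases hm with hm | hm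
        · simp at hm
        · simpa [hasMisX] using hm
      · simp only [compBinGo, if_neg hxy]
        by_cases hX : x ≠ 'X' ∧ y ≠ 'X'
        · rw [if_pos hX]
          apply ih ys _ (chg + 1) (by simpa using hl)
          rcases hm with hm | hm
          · exfalso
            simp only [Bool.and_eq_true, Bool.not_eq_true', beq_eq_false_iff_ne, Bool.or_eq_true,
              beq_iff_eq] at hm
            rcases hm.2 with h' | h' <;> [exact hX.1 h'; exact hX.2 h']
          · simpa [hasMisX] using hm
        · rw [if_neg hX]

lemma go_clean (a : List Char) : ∀ (b : List Char) (res : List Char) (chg : Nat),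
    a.length ≤ b.length → hasMisX a b = false →
    compBinGo a b res chg = (res ++ (a.zip b).map pairF, chg + (a.zip b).countP pairD) := by
  induction a with
  | nil => intro b res chg _ _; simp [compBinGo]
  | cons x xs ih =>
    intro b res chg hl hm
    cases b with
    | nil => simp at hl
    | cons y ys =>
      simp only [hasMisX, List.zip_cons_cons, List.any_cons, Bool.or_eq_false_iff] at hm
      by_cases hxy : x = y
      · subst hxy
        simp only [compBinGo, if_true]
        rw [ih ys (res ++ [x]) chg (by simpa using hl) (by simpa [hasMisX] using hm.2)]
        simp [pairF, pairD]
      · have hX : x ≠ 'X' ∧ y ≠ 'X' := by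
          have := hm.1
          simp only [Bool.and_eq_false_iff, Bool.not_eq_false', beq_iff_eq, Bool.or_eq_false_iff,
            beq_eq_false_iff_ne] at this
          rcases this with h' | h'
          · exact absurd h' hxy
          · exact h'
        simp only [compBinGo, if_neg hxy, if_pos hX]
        rw [ih ys (res ++ ['X']) (chg + 1) (by simpa using hl) (by simpa [hasMisX] using hm.2)]
        simp [pairF, pairD, hxy]
        omega

lemma diffs_any_eq (a b : List Char) (h : a.length ≤ b.length) :
    (altDiffs a b).any (fun i => a.getD i ' ' == 'X' || b.getD i ' ' == 'X') = hasMisX a b := by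
  rw [altDiffs, List.any_filter, hasMisX, ← range_map_getD_eq_zip a b h, List.any_map]
  rfl

lemma diffs_len_eq (a b : List Char) (h : a.length ≤ b.length) :
    (altDiffs a b).length = (a.zip b).countP pairD := by
  rw [altDiffs, ← List.countP_eq_length_filter, ← range_map_getD_eq_zip a b h, List.countP_map]
  rfl

lemma mem_diffs (a b : List Char) (i : Nat) :
    i ∈ altDiffs a b ↔ i < a.length ∧ ¬ (a.getD i ' ' = b.getD i ' ') := by
  simp [altDiffs, List.mem_filter, List.mem_range]

-- ===== VERDICT (by name: the statement is the Claim_ definition above) =====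
theorem compBin_spec : Claim_equal_compBin := by
  intro astr bstr _ hpre
  unfold Spec_compBin compBin compBin_alt
  simp only []
  set a := astr.toList with ha
  set b := bstr.toList with hb
  have hl : a.length ≤ b.length := hpre
  by_cases hm : hasMisX a b = true
  · rw [diffs_any_eq a b hl, hm]
    have h1 := go_misX a b [] 0 hl hm
    simp only [if_true]
    split
    · rfl
    · rw [h1]
  · have hm' : hasMisX a b = false := by simpa using hm
    rw [diffs_any_eq a b hl, hm']
    have h2 := go_clean a b [] 0 hl hm'
    rw [h2]
    simp only [List.nil_append, Nat.zero_add, Bool.false_eq_true, if_false]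
    rw [diffs_len_eq a b hl]
    by_cases hgt : (a.zip b).countP pairD > 1
    · simp [hgt]
    · simp only [hgt, if_false]
      have hle : (a.zip b).countP pairD ≤ 1 := by omega
      rcases Nat.lt_or_ge ((a.zip b).countP pairD) 1 with hc | hc
      · -- no differing position: result is astr
        have hc0 : (a.zip b).countP pairD = 0 := by omega
        have hAD : altDiffs a b = [] := by
          have := diffs_len_eq a b hl
          rw [hc0] at this
          exact List.length_eq_zero_iff.mp this
        rw [hAD]
        have hall : ∀ p ∈ a.zip b, pairF p = p.1 := by
          intro p hp
          have hpq : p.1 = p.2 := by simpa [pairD] using List.countP_eq_zero.mp hc0 p hp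
          simp [pairF, hpq]
        rw [List.map_congr_left hall, List.map_fst_zip hl]
        exact String.ofList_toList
      · -- exactly one differing position i: result sets index i to 'X'
        have hc1 : (a.zip b).countP pairD = 1 := by omega
        have hlen1 : (altDiffs a b).length = 1 := by rw [diffs_len_eq a b hl, hc1]
        rcases hAD : altDiffs a b with _ | ⟨i, rest⟩
        · rw [hAD] at hlen1; simp at hlen1
        · have hrest : rest = [] := by
            rw [hAD] at hlen1; simpa using hlen1
          have hiMem : i ∈ altDiffs a b := by rw [hAD]; exact List.mem_cons_self
          have hi := (mem_diffs a b i).mp hiMem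
          have hia : i < a.length := hi.1
          have hib : i < b.length := lt_of_lt_of_le hia hl
          have hine : a[i] ≠ b[i] := by
            have := hi.2
            rwa [List.getD_eq_getElem a ' ' hia, List.getD_eq_getElem b ' ' hib] at this
          have huniq : ∀ j (hja : j < a.length), j ≠ i →
              a[j]'hja = b[j]'(lt_of_lt_of_le hja hl) := by
            intro j hja hji
            by_contra hne
            have hjb : j < b.length := lt_of_lt_of_le hja hl
            have : j ∈ altDiffs a b := by
              rw [mem_diffs]
              refine ⟨hja, ?_⟩
              rwa [List.getD_eq_getElem a ' ' hja, List.getD_eq_getElem b ' ' hjb]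
            rw [hAD, hrest] at this
            simp at this
            exact hji this
          have hsetmap : (a.zip b).map pairF = a.set i 'X' := by
            apply List.ext_getElem
            · simp [List.length_zip]; omega
            · intro j h1 h2
              have hja : j < a.length := by simpa using h2
              have hjb : j < b.length := lt_of_lt_of_le hja hl
              have hjz : j < (a.zip b).length := by simp [List.length_zip]; omega
              rw [List.getElem_map, List.getElem_zip, List.getElem_set]
              by_cases hji : i = j
              · subst hji
                simp [pairF, hine]
              · have := huniq j hja (fun h => hji h.symm)
                simp [pairF, this, hji]
          rw [hsetmap]
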